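-- pv_equiv track=rewrite | github.com/DrunkenZealnut/pinecone_agent | src/context_optimizer.py | reorder_for_llm
-- ===== SOURCE A (Python) =====
-- from typing import List, Dict, Any, Optional
--
-- def reorder_for_llm(
--
--     docs: List[Dict[str, Any]],
--     strategy: str = "lost_in_middle"
-- ) -> List[Dict[str, Any]]:
--     """
--     Reorder documents to optimize LLM attention.
--
--     The "Lost in the Middle" phenomenon shows LLMs pay more attention
--     to content at the beginning and end. This reordering places
--     the most relevant content in those positions.
--
--     Args:
--         docs: List of documents sorted by relevance
--         strategy: Reordering strategy
--             - "lost_in_middle": Best at start and end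
--             - "best_first": Keep original order (highest first)
--             - "best_last": Reverse order (highest last)
--
--     Returns:
--         Reordered list of documents
--     """
--     if not docs or len(docs) <= 2:
--         return docs
--
--     if strategy == "best_first":
--         return docs
--
--     if strategy == "best_last":
--         return list(reversed(docs))
--
--     if strategy == "lost_in_middle":
--         # Interleave: best at start and end, worst in middle
--         n = len(docs)
--         reordered = [None] * n
--
--         # Place even-indexed items from the start
--         # Place odd-indexed items from the end
--         start_idx = 0
--         end_idx = n - 1
--
--         for i, doc in enumerate(docs):
--             if i % 2 == 0:
--                 reordered[start_idx] = doc
--                 start_idx += 1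
--             else:
--                 reordered[end_idx] = doc
--                 end_idx -= 1
--
--         return [doc for doc in reordered if doc is not None]
--
--     return docs
-- ===== SOURCE B (Python) =====
-- def reorder_for_llm(docs, strategy="lost_in_middle"):
--     if not docs or len(docs) <= 2:
--         return docs
--
--     if strategy == "best_first":
--         return docs
--
--     if strategy == "best_last":
--         return list(reversed(docs))
--
--     if strategy == "lost_in_middle":
--         # Even-ranked docs go to the front in order, odd-ranked docs fill
--         # the back in reverse: two parity slices and one concatenation.
--         evens = docs[0::2]
--         odds = docs[1::2]
--         return evens + odds[::-1]
--
--     return docs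
-- ===== Notes on version B (the rewrite author's own statement) =====
-- stated objective: simpler
-- what changed: The lost_in_middle branch no longer preallocates a [None]*n array and scatters elements by two moving indices; it is computed directly as the even-index slice followed by the reversed odd-index slice, and the trailing None-filter disappears.
import Mathlib
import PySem

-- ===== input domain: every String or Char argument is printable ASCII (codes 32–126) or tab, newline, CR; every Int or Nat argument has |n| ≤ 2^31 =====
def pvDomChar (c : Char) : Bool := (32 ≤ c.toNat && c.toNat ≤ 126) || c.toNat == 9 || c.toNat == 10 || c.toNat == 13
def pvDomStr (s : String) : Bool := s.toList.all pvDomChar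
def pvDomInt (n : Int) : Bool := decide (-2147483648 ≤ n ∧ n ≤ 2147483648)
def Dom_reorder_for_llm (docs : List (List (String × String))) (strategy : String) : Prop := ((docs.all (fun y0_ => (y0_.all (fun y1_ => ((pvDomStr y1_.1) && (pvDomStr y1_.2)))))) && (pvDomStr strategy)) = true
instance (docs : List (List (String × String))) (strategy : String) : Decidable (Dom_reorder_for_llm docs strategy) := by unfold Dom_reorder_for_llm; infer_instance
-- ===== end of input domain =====

-- B replaces A's preallocated scatter array for "lost_in_middle" by two parity
-- slices and one concatenation (objective: simpler).


-- ===== PORT A =====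
-- The for-loop over enumerate(docs): state (reordered, start_idx, end_idx).
-- 'reordered[idx] = doc' is ported as List.set; in A both indices always stay
-- inside 0..n-1 (so List.set is exact here, and end_idx stays nonnegative).
def pvA_go (l : List (List (String × String))) (i : Nat)
    (arr : List (Option (List (String × String)))) (s : Nat) (e : Int) :
    List (Option (List (String × String))) :=
  match l with
  | [] => arr
  | d :: rest =>
    if i % 2 = 0 then pvA_go rest (i + 1) (arr.set s (some d)) (s + 1) e
    else pvA_go rest (i + 1) (arr.set e.toNat (some d)) s (e - 1)

def reorder_for_llm (docs : List (List (String × String))) (strategy : String) : List (List (String × String)) :=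
  if docs.isEmpty ∨ docs.length ≤ 2 then docs
  else if strategy = "best_first" then docs
  else if strategy = "best_last" then docs.reverse
  else if strategy = "lost_in_middle" then
    -- reordered = [None] * n; the scatter loop; then drop the None sentinels
    (pvA_go docs 0 (List.replicate docs.length none) 0 ((docs.length : Int) - 1)).filterMap id
  else docs

-- ===== PORT B =====
-- exact port of the extended slice xs[0::2] (PySem.List.slice covers step-1 slices only)
def pvSlice02 {α : Type} : List α → List α
  | [] => []
  | [x] => [x]
  | x :: _ :: r => x :: pvSlice02 r

-- exact port of the extended slice xs[1::2]
def pvSlice12 {α : Type} (l : List α) : List α :=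
  match l with
  | [] => []
  | _ :: t => pvSlice02 t

def reorder_for_llm_alt (docs : List (List (String × String))) (strategy : String) : List (List (String × String)) :=
  if docs.isEmpty ∨ docs.length ≤ 2 then docs
  else if strategy = "best_first" then docs
  else if strategy = "best_last" then docs.reverse
  else if strategy = "lost_in_middle" then
    pvSlice02 docs ++ (pvSlice12 docs).reverse
  else docs

-- ===== PRECONDITION & SPEC =====
def Spec_reorder_for_llm (docs : List (List (String × String))) (strategy : String) (out : List (List (String × String))) : Prop := out = reorder_for_llm_alt docs strategy
instance (docs : List (List (String × String))) (strategy : String) (out : List (List (String × String))) : Decidable (Spec_reorder_for_llm docs strategy out) := by unfold Spec_reorder_for_llm; infer_instance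

-- ===== CLAIM (what is proved, stated in full; the proofs are below) =====
def Claim_equal_reorder_for_llm : Prop := ∀ (docs : List (List (String × String))) (strategy : String), Dom_reorder_for_llm docs strategy → Spec_reorder_for_llm docs strategy (reorder_for_llm docs strategy)

-- ===== LEMMAS AND PROOFS =====

lemma slice02_cons {α : Type} (y : α) (r : List α) :
    pvSlice02 (y :: r) = y :: pvSlice12 r := by
  cases r <;> simp [pvSlice02, pvSlice12]

-- setting the first free slot of the none-padding
lemma set_front {α : Type} (pre suf : List α) (k : Nat) (d : α) :
    (pre.map some ++ List.replicate (k + 1) (none : Option α) ++ suf.map some).set pre.length (some d)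
      = pre.map some ++ (some d :: List.replicate k none) ++ suf.map some := by
  induction pre with
  | nil => simp [List.replicate_succ]
  | cons a t ih => simpa using ih

-- setting the last free slot of the none-padding
lemma set_back_nil {α : Type} (suf : List α) (k : Nat) (d : α) :
    (List.replicate (k + 1) (none : Option α) ++ suf.map some).set k (some d)
      = List.replicate k none ++ (some d :: suf.map some) := by
  induction k with
  | zero => simp
  | succ k ih => simpa [List.replicate_succ] using ih

lemma set_back {α : Type} (pre suf : List α) (k : Nat) (d : α) :
    (pre.map some ++ List.replicate (k + 1) (none : Option α) ++ suf.map some).set (pre.length + k) (some d)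
      = pre.map some ++ List.replicate k none ++ (some d :: suf.map some) := by
  induction pre with
  | nil => simpa using set_back_nil suf k d
  | cons a t ih =>
      rw [List.length_cons, show t.length + 1 + k = (t.length + k) + 1 from by omega]
      simpa using ih

-- loop invariant: with evens-so-far 'pre' in front, odds-so-far reversed in 'suf'
-- behind the none padding, the loop fills the padding with B's two slices
lemma go_inv (l : List (List (String × String))) :
    ∀ (pre suf : List (List (String × String))) (i : Nat), i % 2 = 0 →
    pvA_go l i (pre.map some ++ List.replicate l.length none ++ suf.map some)
        pre.length ((pre.length : Int) + l.length - 1)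
      = (pre ++ pvSlice02 l).map some ++ ((pvSlice12 l).reverse ++ suf).map some := by
  induction l using pvSlice02.induct with
  | case1 => intro pre suf i hi; simp [pvA_go, pvSlice02, pvSlice12]
  | case2 x =>
      intro pre suf i hi
      simp only [pvA_go, hi, if_pos, List.length_cons, List.length_nil]
      rw [show (1 : Nat) = 0 + 1 from rfl, set_front pre suf 0 x]
      simp [pvSlice02, pvSlice12]
  | case3 x y r ih =>
      intro pre suf i hi
      have hi1 : ¬ (i + 1) % 2 = 0 := by omega
      have hlen : (x :: y :: r).length = (r.length + 1) + 1 := by simp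
      rw [hlen]
      simp only [pvA_go]
      rw [if_pos hi, if_neg hi1]
      rw [set_front pre suf (r.length + 1) x]
      have harr : pre.map some ++ (some x :: List.replicate (r.length + 1) (none : Option (List (String × String)))) ++ suf.map some
          = (pre ++ [x]).map some ++ List.replicate (r.length + 1) none ++ suf.map some := by
        simp
      rw [harr]
      generalize hE : ((pre.length : Int) + ((r.length + 1 : Nat) + 1 : Nat) - 1 : Int) = E
      have hEtoNat : E.toNat = (pre ++ [x]).length + r.length := by
        simp only [List.length_append, List.length_cons, List.length_nil] at *
        omega
      have hEsub : E - 1 = (((pre ++ [x]).length : Int)) + r.length - 1 := by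
        simp only [List.length_append, List.length_cons, List.length_nil] at *
        push_cast at *
        omega
      rw [hEtoNat, set_back (pre ++ [x]) suf r.length y]
      have hsuf : ((pre ++ [x]).map some ++ List.replicate r.length none ++ (some y :: suf.map some))
          = ((pre ++ [x]).map some ++ List.replicate r.length none ++ ((y :: suf).map some)) := by
        simp
      rw [hsuf, hEsub, show pre.length + 1 = (pre ++ [x]).length from by simp,
        ih (pre ++ [x]) (y :: suf) (i + 2) (by omega)]
      rw [show pvSlice02 (x :: y :: r) = x :: pvSlice02 r from rfl,
          show pvSlice12 (x :: y :: r) = pvSlice02 (y :: r) from rfl, slice02_cons y r]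
      simp

lemma pv_lim_eq (docs : List (List (String × String))) :
    (pvA_go docs 0 (List.replicate docs.length none) 0 ((docs.length : Int) - 1)).filterMap id
      = pvSlice02 docs ++ (pvSlice12 docs).reverse := by
  have h := go_inv docs [] [] 0 rfl
  simp only [List.map_nil, List.nil_append, List.append_nil, List.length_nil,
    Nat.cast_zero, zero_add] at h
  rw [h]
  simp

-- ===== VERDICT (by name: the statement is the Claim_ definition above) =====
theorem reorder_for_llm_spec : Claim_equal_reorder_for_llm := by
  intro docs strategy _
  unfold Spec_reorder_for_llm reorder_for_llm reorder_for_llm_alt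
  split_ifs <;> first | rfl | exact pv_lim_eq docs
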